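-- pv_equiv track=rewrite | github.com/manas-17045/LeetcodeSolutions | Leetcode 1201-1300/1224/1224_1.py | maxEqualFreq
-- ===== SOURCE A (Python) =====
-- def maxEqualFreq(nums: list[int]) -> int:
--     """
--     Finds the maximum length of a prefix of the given array such that after removing exactly one element from it,
--     all remaining elements have the same frequency.
--
--     Args:
--         nums (list[int]): A list of integers.
--     Returns:
--         int: The maximum length of a valid prefix.
--     """
--     numCounts = {}
--     freqCounts = {}
--     maxLength = 0
--
--     for i, currentNum in enumerate(nums):
--         previousCount = numCounts.get(currentNum, 0)
--         numCounts[currentNum] = previousCount + 1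
--         currentCount = previousCount + 1
--
--         if previousCount > 0:
--             freqCounts[previousCount] -= 1
--             if freqCounts[previousCount] == 0:
--                 del freqCounts[previousCount]
--
--         freqCounts[currentCount] = freqCounts.get(currentCount, 0) + 1
--
--         isValid = False
--         if len(freqCounts) == 1:
--             freq, countOfFreq = next(iter(freqCounts.items()))
--             if freq == 1 or countOfFreq == 1:
--                 isValid = True
--         elif len(freqCounts) == 2:
--             (freq1, count1), (freq2, count2) = freqCounts.items()
--
--             if (freq1 == 1 and count1 == 1) or (freq2 == 1 and count2 == 1):
--                 isValid = True
--             elif (freq1 + 1 == freq2 and count2 == 1) or (freq2 + 1 == freq1 and count1 == 1):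
--                 isValid = True
--
--         if isValid:
--             maxLength = i + 1
--
--     return maxLength
-- ===== SOURCE B (Python) =====
-- def maxEqualFreq(nums: list[int]) -> int:
--     # Same O(n) pass, but validity is decided arithmetically against the running
--     # maximum frequency instead of by case analysis on the count-of-counts dict size.
--     cnt = {}
--     freq = {}
--     maxF = 0
--     best = 0
--     for i, x in enumerate(nums):
--         c = cnt.get(x, 0) + 1
--         cnt[x] = c
--         freq[c - 1] = freq.get(c - 1, 0) - 1  # freq[0] may go negative; never read
--         freq[c] = freq.get(c, 0) + 1
--         if c > maxF:
--             maxF = c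
--         n = i + 1
--         if maxF == 1 or maxF * freq.get(maxF, 0) == n - 1 \
--                 or (maxF - 1) * (freq.get(maxF - 1, 0) + 1) == n - 1:
--             best = n
--     return best
-- ===== Notes on version B (the rewrite author's own statement) =====
-- stated objective: alternative
-- what changed: B keeps the single counting pass but replaces A's case analysis on the size and shape of the count-of-counts dict (len==1 / len==2 with four patterns, plus delete-on-zero maintenance) by a running maximum frequency maxF and three arithmetic validity tests against the prefix length, leaving zero entries in the freq dict.
import Mathlib
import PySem

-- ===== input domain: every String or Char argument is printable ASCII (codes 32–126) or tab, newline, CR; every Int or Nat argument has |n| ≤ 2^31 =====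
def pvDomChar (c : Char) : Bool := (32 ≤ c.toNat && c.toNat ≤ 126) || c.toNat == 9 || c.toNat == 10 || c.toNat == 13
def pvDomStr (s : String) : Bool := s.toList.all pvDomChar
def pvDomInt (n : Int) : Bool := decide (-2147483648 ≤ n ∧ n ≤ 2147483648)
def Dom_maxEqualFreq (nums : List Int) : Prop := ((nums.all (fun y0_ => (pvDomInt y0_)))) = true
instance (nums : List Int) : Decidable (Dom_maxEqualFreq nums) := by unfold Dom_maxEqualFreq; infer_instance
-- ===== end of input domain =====

-- B replaces A's case analysis on the size/shape of the count-of-counts dict by an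
-- arithmetic validity test against the running maximum frequency (objective: alternative).

-- ===== PORT A =====
-- the if len(freqCounts)==1 / elif len(freqCounts)==2 validity block of A
def validA_items (l : List (Int × Int)) : Bool :=
  match l with
  | [(f, c)] => f == 1 || c == 1
  | [(f1, c1), (f2, c2)] =>
      if (f1 == 1 && c1 == 1) || (f2 == 1 && c2 == 1) then true
      else (f1 + 1 == f2 && c2 == 1) || (f2 + 1 == f1 && c1 == 1)
  | _ => false

-- one iteration of A's loop; state = (numCounts, freqCounts, maxLength), p = (i, currentNum)
def maxEqualFreqStepA (st : PySem.Dict Int Int × PySem.Dict Int Int × Int) (p : Int × Int) :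
    PySem.Dict Int Int × PySem.Dict Int Int × Int :=
  match st, p with
  | (numCounts, freqCounts, maxLength), (i, currentNum) =>
    let previousCount := numCounts.getD currentNum 0
    let numCounts' := numCounts.insert currentNum (previousCount + 1)
    let currentCount := previousCount + 1
    -- freqCounts[previousCount] -= 1; del if 0 (when previousCount > 0 the key is always
    -- present with a positive value — see hw1 in step_inv below — so Python's A never raises)
    let fc1 :=
      if 0 < previousCount then
        let fc := freqCounts.insert previousCount (freqCounts.getD previousCount 0 - 1)
        if fc.getD previousCount 0 = 0 then fc.erase previousCount else fc
      else freqCounts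
    let fc2 := fc1.insert currentCount (fc1.getD currentCount 0 + 1)
    (numCounts', fc2, if validA_items fc2.items then i + 1 else maxLength)

def maxEqualFreq (nums : List Int) : Int :=
  ((PySem.List.enumerate nums 0).foldl maxEqualFreqStepA
    (PySem.Dict.empty, PySem.Dict.empty, 0)).2.2

-- ===== PORT B =====
-- B's arithmetic validity test against the running maximum frequency maxF
def validB_check (freq : PySem.Dict Int Int) (maxF n : Int) : Bool :=
  maxF == 1 || maxF * freq.getD maxF 0 == n - 1 ||
    (maxF - 1) * (freq.getD (maxF - 1) 0 + 1) == n - 1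

-- one iteration of B's loop; state = (cnt, freq, maxF, best), p = (i, x)
def maxEqualFreqStepB (st : PySem.Dict Int Int × PySem.Dict Int Int × Int × Int) (p : Int × Int) :
    PySem.Dict Int Int × PySem.Dict Int Int × Int × Int :=
  match st, p with
  | (cnt, freq, maxF, best), (i, x) =>
    let c := cnt.getD x 0 + 1
    let cnt' := cnt.insert x c
    let freq1 := freq.insert (c - 1) (freq.getD (c - 1) 0 - 1)
    let freq2 := freq1.insert c (freq1.getD c 0 + 1)
    let maxF' := if maxF < c then c else maxF
    let n := i + 1
    (cnt', freq2, maxF', if validB_check freq2 maxF' n then n else best)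

def maxEqualFreq_alt (nums : List Int) : Int :=
  ((PySem.List.enumerate nums 0).foldl maxEqualFreqStepB
    (PySem.Dict.empty, PySem.Dict.empty, 0, 0)).2.2.2

-- ===== PRECONDITION & SPEC =====
def Spec_maxEqualFreq (nums : List Int) (out : Int) : Prop := out = maxEqualFreq_alt nums
instance (nums : List Int) (out : Int) : Decidable (Spec_maxEqualFreq nums out) := by unfold Spec_maxEqualFreq; infer_instance

-- ===== CLAIM (what is proved, stated in full; the proofs are below) =====
def Claim_equal_maxEqualFreq : Prop := ∀ (nums : List Int), Dom_maxEqualFreq nums → Spec_maxEqualFreq nums (maxEqualFreq nums)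

-- ===== LEMMAS AND PROOFS =====

-- sum of key*value over an association list (= the prefix length counted by a count-of-counts dict)
def Slist (l : List (Int × Int)) : Int := (l.map (fun p => p.1 * p.2)).sum

-- number of entries of l whose VALUE is w (Int-valued, for count-of-counts bookkeeping)
def cntv (l : List (Int × Int)) (w : Int) : Int :=
  (l.map (fun p => if p.2 = w then 1 else 0)).sum

def lookD (l : List (Int × Int)) (k : Int) : Int :=
  ((l.find? (fun p => p.1 == k)).map (fun p => p.2)).getD 0

theorem find?_filter_self (t : List (Int × Int)) (k : Int) :
    (t.filter (fun p => !(p.1 == k))).find? (fun p => p.1 == k) = none := by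
  rw [List.find?_eq_none]
  intro p hp
  simp only [List.mem_filter, Bool.not_eq_eq_eq_not, Bool.not_true, beq_eq_false_iff_ne] at hp
  simp [hp.2]

theorem find?_filter_ne (t : List (Int × Int)) (k k' : Int) (h : k' ≠ k) :
    (t.filter (fun p => !(p.1 == k))).find? (fun p => p.1 == k') =
      t.find? (fun p => p.1 == k') := by
  induction t with
  | nil => simp
  | cons a t ih =>
    by_cases hak : a.1 = k
    · have h1 : (a.1 == k) = true := by simp [hak]
      have h2 : (a.1 == k') = false := by simp [hak]; omega
      simp [h1, h2, ih]
    · have h1 : (a.1 == k) = false := by simp [hak]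
      by_cases hak' : a.1 = k'
      · have h2 : (a.1 == k') = true := by simp [hak']
        simp [h1, h2]
      · have h2 : (a.1 == k') = false := by simp [hak']
        simp [h1, h2, ih]

theorem mem_items_erase (d : PySem.Dict Int Int) (k : Int) (p : Int × Int) :
    p ∈ (d.erase k).items ↔ p ∈ d.items ∧ ¬ p.1 = k := by
  simp [PySem.Dict.erase, List.mem_filter]

theorem nodup_keys_erase (d : PySem.Dict Int Int) (k : Int) (h : d.keys.Nodup) :
    (d.erase k).keys.Nodup := by
  simp only [PySem.Dict.keys, PySem.Dict.erase] at *
  exact h.sublist (List.Sublist.map _ List.filter_sublist)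

theorem getD_erase (d : PySem.Dict Int Int) (k k' v : Int) :
    (d.erase k).getD k' v = if k' = k then v else d.getD k' v := by
  obtain ⟨l⟩ := d
  simp only [PySem.Dict.erase, PySem.Dict.getD, PySem.Dict.get?]
  by_cases h : k' = k
  · subst h; rw [find?_filter_self]; simp
  · rw [find?_filter_ne _ _ _ h]; simp [h]

theorem any_filter_key (t : List (Int × Int)) (k k' : Int) :
    ((t.filter (fun p => !(p.1 == k))).any (fun p => p.1 == k')) =
      if k' = k then false else t.any (fun p => p.1 == k') := by
  induction t with
  | nil => simp
  | cons a t ih =>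
    by_cases hak : a.1 = k <;> by_cases hak' : a.1 = k'
    · have : k' = k := by omega
      simp [hak, this]
    · have h1 : (a.1 == k) = true := by simp [hak]
      have h2 : (a.1 == k') = false := by simp [hak']
      simp [List.any_cons, h1, h2, ih]
    · have h1 : (a.1 == k) = false := by simp [hak]
      have h2 : (a.1 == k') = true := by simp [hak']
      have hkk : ¬ k' = k := by omega
      simp [List.any_cons, h1, h2, hkk]
    · have h1 : (a.1 == k) = false := by simp [hak]
      have h2 : (a.1 == k') = false := by simp [hak']
      simp [List.any_cons, h1, h2, ih]

theorem contains_erase (d : PySem.Dict Int Int) (k k' : Int) :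
    (d.erase k).contains k' = if k' = k then false else d.contains k' := by
  obtain ⟨l⟩ := d
  simp only [PySem.Dict.erase, PySem.Dict.contains]
  exact any_filter_key l k k'


theorem msum_split (f : Int × Int → Int) (l : List (Int × Int)) (k : Int)
    (hnd : (l.map (fun p => p.1)).Nodup) (h0 : f (k, 0) = 0) :
    (l.map f).sum = f (k, lookD l k) + ((l.filter (fun p => !(p.1 == k))).map f).sum := by
  induction l with
  | nil => simp [lookD, h0]
  | cons a t ih =>
    simp only [List.map_cons, List.nodup_cons, List.mem_map] at hnd
    by_cases hak : a.1 = k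
    · have hfilt : t.filter (fun p => !(p.1 == k)) = t := by
        apply List.filter_eq_self.mpr
        intro p hp
        simp only [Bool.not_eq_eq_eq_not, Bool.not_true, beq_eq_false_iff_ne, ne_eq]
        intro hpk; exact hnd.1 ⟨p, hp, by omega⟩
      have h1 : (a.1 == k) = true := by simp [hak]
      have ha : a = (k, a.2) := by cases a; simp_all
      simp [lookD, h1, hfilt]
      rw [ha]
    · have h1 : (a.1 == k) = false := by simp [hak]
      simp only [lookD, List.find?_cons, List.filter_cons, h1, Bool.not_false, List.map_cons,
        List.sum_cons, if_true]
      rw [ih hnd.2]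
      simp [lookD]; ring

-- pointwise replacement at a present key
theorem msum_replace (f : Int × Int → Int) (l : List (Int × Int)) (k v : Int)
    (hnd : (l.map (fun p => p.1)).Nodup) (hc : l.any (fun p => p.1 == k) = true) :
    ((l.map (fun p => if p.1 == k then (k, v) else p)).map f).sum =
      (l.map f).sum + f (k, v) - f (k, lookD l k) := by
  induction l with
  | nil => simp at hc
  | cons a t ih =>
    simp only [List.map_cons, List.nodup_cons, List.mem_map] at hnd
    by_cases hak : a.1 = k
    · have h1 : (a.1 == k) = true := by simp [hak]
      have hrep : t.map (fun p => if p.1 == k then (k, v) else p) = t := by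
        apply List.map_congr_left ?_ |>.trans (List.map_id _)
        intro p hp
        have : ¬ p.1 = k := fun hpk => hnd.1 ⟨p, hp, by omega⟩
        simp [this]
      have hl : lookD (a :: t) k = a.2 := by simp [lookD, h1]
      simp only [List.map_cons, h1, if_true, hrep, List.sum_cons, hl]
      have ha : a = (k, a.2) := by cases a; simp_all
      rw [ha]; ring
    · have h1 : (a.1 == k) = false := by simp [hak]
      have hc' : t.any (fun p => p.1 == k) = true := by
        simp only [List.any_cons, h1, Bool.false_or] at hc; exact hc
      simp only [List.map_cons, h1, List.sum_cons, lookD, List.find?_cons]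
      rw [ih hnd.2 hc']
      simp [lookD]; ring

theorem lookD_eq_getD (d : PySem.Dict Int Int) (k : Int) : lookD d.items k = d.getD k 0 := rfl

theorem msum_insert (f : Int × Int → Int) (d : PySem.Dict Int Int) (k v : Int)
    (hnd : d.keys.Nodup) (h0 : f (k, 0) = 0) :
    ((d.insert k v).items.map f).sum = (d.items.map f).sum + f (k, v) - f (k, d.getD k 0) := by
  by_cases hc : d.contains k = true
  · rw [PySem.Dict.items_insert_of_contains _ _ hc, msum_replace f d.items k v hnd hc,
      lookD_eq_getD]
  · rw [PySem.Dict.items_insert_of_not_contains _ _ (by simpa using hc)]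
    rw [PySem.Dict.getD_of_not_contains _ _ (by simpa using hc), h0]
    simp

theorem Slist_insert (d : PySem.Dict Int Int) (k v : Int) (hnd : d.keys.Nodup) :
    Slist (d.insert k v).items = Slist d.items + k * v - k * d.getD k 0 := by
  simpa using msum_insert (fun p => p.1 * p.2) d k v hnd (by simp)

theorem Slist_erase (d : PySem.Dict Int Int) (k : Int) (hnd : d.keys.Nodup) :
    Slist (d.erase k).items = Slist d.items - k * d.getD k 0 := by
  have := msum_split (fun p => p.1 * p.2) d.items k hnd (by simp)
  rw [lookD_eq_getD] at this
  simp only [Slist, PySem.Dict.erase] at this ⊢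
  omega

theorem cntv_insert (d : PySem.Dict Int Int) (k v w : Int) (hnd : d.keys.Nodup) (hw : w ≠ 0) :
    cntv (d.insert k v).items w =
      cntv d.items w + (if v = w then 1 else 0) - (if d.getD k 0 = w then 1 else 0) := by
  have h0 : (fun p : Int × Int => if p.2 = w then (1:Int) else 0) (k, 0) = 0 := by simp [hw.symm]
  by_cases hc : d.contains k = true
  · have := msum_replace (fun p : Int × Int => if p.2 = w then (1:Int) else 0) d.items k v hnd hc
    rw [lookD_eq_getD] at this
    rw [PySem.Dict.items_insert_of_contains _ _ hc]
    simpa [cntv] using this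
  · rw [PySem.Dict.items_insert_of_not_contains _ _ (by simpa using hc)]
    rw [PySem.Dict.getD_of_not_contains _ _ (by simpa using hc)]
    simp [cntv, hw.symm]

theorem cntv_nonneg (l : List (Int × Int)) (w : Int) : 0 ≤ cntv l w := by
  apply List.sum_nonneg
  intro x hx
  simp only [List.mem_map] at hx
  obtain ⟨p, _, rfl⟩ := hx
  split_ifs <;> omega

theorem cntv_pos_of_mem (l : List (Int × Int)) (a w : Int) (h : (a, w) ∈ l) :
    1 ≤ cntv l w := by
  induction l with
  | nil => simp at h
  | cons b t ih =>
    simp only [cntv, List.map_cons, List.sum_cons]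
    have hnn := cntv_nonneg t w
    rcases List.mem_cons.1 h with hb | ht
    · subst hb; simp only [cntv] at hnn ⊢; simp; omega
    · have := ih ht; simp only [cntv] at this ⊢; split_ifs <;> omega

theorem getD_nonneg (d : PySem.Dict Int Int) (k : Int) (h : ∀ p ∈ d.items, 1 ≤ p.2) :
    0 ≤ d.getD k 0 := by
  rcases hg : d.get? k with _ | v
  · rw [PySem.Dict.getD_of_get?_eq_none _ _ hg]
  · rw [PySem.Dict.getD_of_get?_eq_some _ _ hg]
    exact le_trans (by omega) (h _ (PySem.Dict.mem_items_of_get?_eq_some _ hg))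

theorem contains_of_getD_pos (d : PySem.Dict Int Int) (k : Int) (h : d.getD k 0 ≠ 0) :
    d.contains k = true := by
  by_contra hc
  exact h (PySem.Dict.getD_of_not_contains _ _ (by simpa using hc))

theorem getD_mem_items (d : PySem.Dict Int Int) (k : Int) (h : d.contains k = true) :
    (k, d.getD k 0) ∈ d.items := by
  rw [PySem.Dict.contains_eq_isSome_get?] at h
  rcases hg : d.get? k with _ | v
  · rw [hg] at h; simp at h
  · rw [PySem.Dict.getD_of_get?_eq_some _ _ hg]
    exact PySem.Dict.mem_items_of_get?_eq_some _ hg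

theorem Slist_ge_length (l : List (Int × Int)) (h : ∀ p ∈ l, 1 ≤ p.1 ∧ 1 ≤ p.2) :
    (l.length : Int) ≤ Slist l := by
  induction l with
  | nil => simp [Slist]
  | cons a t ih =>
    simp only [Slist, List.map_cons, List.sum_cons, List.length_cons]
    have ha := h a (by simp)
    have h1 : (1 : Int) ≤ a.1 * a.2 := by nlinarith [ha.1, ha.2]
    have := ih (fun p hp => h p (by simp [hp]))
    simp only [Slist] at this
    push_cast
    omega

theorem lookD_filter_ne (l : List (Int × Int)) (k k' : Int) (h : k' ≠ k) :
    lookD (l.filter (fun p => !(p.1 == k))) k' = lookD l k' := by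
  simp only [lookD, find?_filter_ne l k k' h]

theorem validA_pair_symm (f1 c1 f2 c2 : Int) :
    validA_items [(f1, c1), (f2, c2)] = validA_items [(f2, c2), (f1, c1)] := by
  simp only [validA_items]
  rw [Bool.or_comm (f1 == 1 && c1 == 1), Bool.or_comm (f1 + 1 == f2 && c2 == 1)]

theorem pair_aux (f1 c1 f2 c2 cm1 n : Int)
    (h11 : 1 ≤ f1) (h12 : 1 ≤ c1) (h22 : 1 ≤ c2)
    (hlt : f1 < f2) (hn : f1 * c1 + f2 * c2 = n)
    (hcm1 : cm1 = if f2 - 1 = f1 then c1 else 0) :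
    validA_items [(f1, c1), (f2, c2)] =
      ((f2 * c2 == n - 1) || ((f2 - 1) * (cm1 + 1) == n - 1)) := by
  have h2 : 2 ≤ f2 := by omega
  have hf2ne : (f2 == 1) = false := by simp; omega
  have hf21 : (f2 + 1 == f1) = false := by simp; omega
  have hite : ∀ (x y : Bool), (if x = true then true else y) = (x || y) := by decide
  have hq1 : f2 ≤ f2 * c2 := by nlinarith
  have hp1 : 1 ≤ f1 * c1 := by nlinarith
  rw [Bool.eq_iff_iff]
  simp only [validA_items, hf2ne, hf21, Bool.false_and, Bool.or_false,
    Bool.and_eq_true, Bool.or_eq_true, beq_iff_eq]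
  by_cases hC : f1 = 1 ∧ c1 = 1
  · rw [if_pos hC]
    constructor
    · intro _
      left
      rw [hC.1, hC.2] at hn
      omega
    · intro _; trivial
  · rw [if_neg hC]
    simp only [Bool.and_eq_true, beq_iff_eq]
    constructor
    · rintro ⟨hf, hc⟩
      right
      have he : f2 - 1 = f1 := by omega
      rw [hcm1, if_pos he]
      have hexp : (f2 - 1) * (c1 + 1) = (f2 - 1) * c1 + (f2 - 1) := by ring
      rw [← he] at hn
      rw [hc] at hn
      have hf2e : f2 * 1 = f2 := by ring
      omega
    · rintro (h | h)
      · exfalso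
        have hp : f1 * c1 = 1 := by omega
        rcases Int.mul_eq_one_iff_eq_one_or_neg_one.1 hp with ⟨ha, hb⟩ | ⟨ha, hb⟩
        · exact hC ⟨ha, hb⟩
        · omega
      · by_cases he : f2 - 1 = f1
        · rw [hcm1, if_pos he] at h
          have hexp : (f2 - 1) * (c1 + 1) = (f2 - 1) * c1 + (f2 - 1) := by ring
          rw [← he] at hn hp1
          have hq : f2 * c2 = f2 * 1 := by omega
          have hc2 : c2 = 1 := by
            have := mul_left_cancel₀ (a := f2) (by omega) hq
            omega
          exact ⟨by omega, by simp [hc2]⟩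
        · rw [hcm1, if_neg he] at h
          exfalso
          have hz : (f2 - 1) * (0 + 1) = f2 - 1 := by ring
          omega

theorem length_filter_key_ge (l : List (Int × Int)) (k : Int)
    (hnd : (l.map (fun p => p.1)).Nodup) :
    l.length - 1 ≤ (l.filter (fun p => !(p.1 == k))).length := by
  induction l with
  | nil => simp
  | cons a t ih =>
    simp only [List.map_cons, List.nodup_cons, List.mem_map] at hnd
    by_cases hak : a.1 = k
    · have hfilt : t.filter (fun p => !(p.1 == k)) = t := by
        apply List.filter_eq_self.mpr
        intro p hp
        simp only [Bool.not_eq_eq_eq_not, Bool.not_true, beq_eq_false_iff_ne, ne_eq]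
        intro hpk; exact hnd.1 ⟨p, hp, by omega⟩
      have h1 : (a.1 == k) = true := by simp [hak]
      simp [h1, hfilt]
    · have h1 : (a.1 == k) = false := by simp [hak]
      have := ih hnd.2
      simp only [List.filter_cons, h1, Bool.not_false, if_true, List.length_cons]
      omega

theorem valid_eq (fc fr : PySem.Dict Int Int) (maxF n : Int)
    (hnd : fc.keys.Nodup) (hpos : ∀ p ∈ fc.items, 1 ≤ p.1 ∧ 1 ≤ p.2)
    (hsum : Slist fc.items = n) (hub : ∀ p ∈ fc.items, p.1 ≤ maxF)
    (hat : fc.contains maxF = true)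
    (hlink : ∀ k : Int, 1 ≤ k → fc.getD k 0 = fr.getD k 0) :
    validA_items fc.items = validB_check fr maxF n := by
  have hvm := getD_mem_items fc maxF hat
  have hm1 : 1 ≤ maxF := (hpos _ hvm).1
  have hcm : 1 ≤ fc.getD maxF 0 := (hpos _ hvm).2
  have hks : (fc.items.map (fun p => p.1)).Nodup := hnd
  by_cases hMF : maxF = 1
  · have hB : validB_check fr maxF n = true := by simp [validB_check, hMF]
    rw [hB]
    rcases hit : fc.items with _ | ⟨a, _ | ⟨b, t⟩⟩
    · rw [hit] at hvm; simp at hvm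
    · have ha1 : a.1 = 1 := by
        have h1 := (hpos a (by rw [hit]; simp)).1
        have h2 := hub a (by rw [hit]; simp)
        omega
      obtain ⟨f, c⟩ := a
      simp only at ha1
      simp [validA_items, ha1]
    · exfalso
      have ha1 : a.1 = 1 := by
        have h1 := (hpos a (by rw [hit]; simp)).1
        have h2 := hub a (by rw [hit]; simp)
        omega
      have hb1 : b.1 = 1 := by
        have h1 := (hpos b (by rw [hit]; simp)).1
        have h2 := hub b (by rw [hit]; simp)
        omega
      rw [hit] at hks
      simp only [List.map_cons] at hks
      have hab : a.1 = b.1 := by omega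
      exact (List.nodup_cons.1 hks).1 (hab ▸ List.mem_cons_self)
  · have hm2 : 2 ≤ maxF := by omega
    have e1 : fr.getD maxF 0 = fc.getD maxF 0 := (hlink maxF (by omega)).symm
    have e2 : fr.getD (maxF - 1) 0 = fc.getD (maxF - 1) 0 := (hlink _ (by omega)).symm
    have hBm : (maxF == 1) = false := by simp [hMF]
    unfold validB_check
    rw [e1, e2, hBm]
    simp only [Bool.false_or]
    rcases hit : fc.items with _ | ⟨a, _ | ⟨b, _ | ⟨c0, t⟩⟩⟩
    · rw [hit] at hvm; simp at hvm
    · -- singleton [a] with a = (maxF, cM)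
      rw [hit] at hvm
      simp only [List.mem_singleton] at hvm
      have hcm1 : fc.getD (maxF - 1) 0 = 0 := by
        rw [← lookD_eq_getD, hit, ← hvm]
        have h1 : (maxF == maxF - 1) = false := by simp; omega
        simp [lookD, h1]
      have hn : maxF * fc.getD maxF 0 = n := by
        rw [← hsum, hit, ← hvm]; simp [Slist]
      rw [← hvm, hcm1]
      rw [Bool.eq_iff_iff]
      simp only [validA_items, hBm, Bool.false_or, beq_iff_eq, Bool.or_eq_true]
      constructor
      · intro hc1
        right
        rw [hc1] at hn
        have hz : (maxF - 1) * (0 + 1) = maxF - 1 := by ring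
        have hz2 : maxF * 1 = maxF := by ring
        omega
      · rintro (h | h)
        · omega
        · have hz : (maxF - 1) * (0 + 1) = maxF - 1 := by ring
          have hq : maxF * fc.getD maxF 0 = maxF * 1 := by omega
          have := mul_left_cancel₀ (a := maxF) (by omega) hq
          omega
    · -- exactly two entries
      obtain ⟨fa, ca⟩ := a
      obtain ⟨fb, cb⟩ := b
      have hane : fa ≠ fb := by
        rw [hit] at hks
        simpa using hks
      have hpa := hpos (fa, ca) (by rw [hit]; simp)
      have hpb := hpos (fb, cb) (by rw [hit]; simp)
      have huba := hub (fa, ca) (by rw [hit]; simp)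
      have hubb := hub (fb, cb) (by rw [hit]; simp)
      simp only at hpa hpb huba hubb
      have hsum2 : fa * ca + fb * cb = n := by
        rw [← hsum, hit]; simp [Slist]
      rw [hit] at hvm
      simp only [List.mem_cons, List.not_mem_nil, or_false,
        Prod.mk.injEq] at hvm
      rcases hvm with ⟨h1, h2⟩ | ⟨h1, h2⟩
      · -- maxF = fa, so fb < fa
        subst h1
        have hblt : fb < maxF := by omega
        have hgm1 : fc.getD (maxF - 1) 0 = if maxF - 1 = fb then cb else 0 := by
          rw [← lookD_eq_getD, hit]
          have hf1 : (maxF == maxF - 1) = false := by simp; omega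
          by_cases hb : fb = maxF - 1
          · have hf2 : (fb == maxF - 1) = true := by simp [hb]
            simp [lookD, hf1, hb]
          · have hf2 : (fb == maxF - 1) = false := by simp [hb]
            have hnb : ¬ (maxF - 1 = fb) := by omega
            simp [lookD, hf1, hf2, hnb]
        rw [h2, hgm1, validA_pair_symm]
        exact pair_aux fb cb maxF ca _ n hpb.1 hpb.2 hpa.2 hblt (by linarith [hsum2]) rfl
      · -- maxF = fb, so fa < fb
        subst h1
        have halt : fa < maxF := by omega
        have hgm1 : fc.getD (maxF - 1) 0 = if maxF - 1 = fa then ca else 0 := by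
          rw [← lookD_eq_getD, hit]
          by_cases hb : fa = maxF - 1
          · have hf1 : (fa == maxF - 1) = true := by simp [hb]
            simp [lookD, hb]
          · have hf1 : (fa == maxF - 1) = false := by simp [hb]
            have hf2 : (maxF == maxF - 1) = false := by simp; omega
            have hnb : ¬ (maxF - 1 = fa) := by omega
            simp [lookD, hf1, hf2, hnb]
        rw [h2, hgm1]
        exact pair_aux fa ca maxF cb _ n hpa.1 hpa.2 hpb.2 halt (by linarith [hsum2]) rfl
    · -- three or more entries: both arithmetic disjuncts are false
      have hlen : 3 ≤ fc.items.length := by rw [hit]; simp only [List.length_cons]; omega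
      have hsplit := msum_split (fun p => p.1 * p.2) fc.items maxF hks (by simp)
      rw [lookD_eq_getD] at hsplit
      have hflen := length_filter_key_ge fc.items maxF hks
      have hrpos : ∀ p ∈ fc.items.filter (fun p => !(p.1 == maxF)), 1 ≤ p.1 ∧ 1 ≤ p.2 :=
        fun p hp => hpos p (List.mem_of_mem_filter hp)
      have hrnd : ((fc.items.filter (fun p => !(p.1 == maxF))).map (fun p => p.1)).Nodup :=
        List.Nodup.sublist (List.Sublist.map _ List.filter_sublist) hks
      have hS1 := Slist_ge_length _ hrpos
      have hsplit2 := msum_split (fun p => p.1 * p.2)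
        (fc.items.filter (fun p => !(p.1 == maxF))) (maxF - 1) hrnd (by simp)
      rw [lookD_filter_ne fc.items maxF (maxF - 1) (by omega), lookD_eq_getD] at hsplit2
      have hflen2 := length_filter_key_ge (fc.items.filter (fun p => !(p.1 == maxF)))
        (maxF - 1) hrnd
      have hS2 := Slist_ge_length
        ((fc.items.filter (fun p => !(p.1 == maxF))).filter (fun p => !(p.1 == maxF - 1)))
        (fun p hp => hrpos p (List.mem_of_mem_filter hp))
      have hc' : 0 ≤ fc.getD (maxF - 1) 0 := getD_nonneg fc _ (fun p hp => (hpos p hp).2)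
      have hmul : maxF ≤ maxF * fc.getD maxF 0 := by nlinarith
      have hX : (maxF * fc.getD maxF 0 == n - 1) = false := by
        simp only [beq_eq_false_iff_ne, ne_eq]
        intro h
        simp only [Slist] at hsplit hsplit2 hS1 hS2 hsum
        omega
      have hY : ((maxF - 1) * (fc.getD (maxF - 1) 0 + 1) == n - 1) = false := by
        simp only [beq_eq_false_iff_ne, ne_eq]
        intro h
        have hexp : (maxF - 1) * (fc.getD (maxF - 1) 0 + 1) =
            (maxF - 1) * fc.getD (maxF - 1) 0 + (maxF - 1) := by ring
        simp only [Slist] at hsplit hsplit2 hS1 hS2 hsum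
        omega
      rw [hX, hY]
      simp [validA_items]

structure EqInv (i : Int) (dA fcA : PySem.Dict Int Int) (bestA : Int)
    (dB fr : PySem.Dict Int Int) (maxF bestB : Int) : Prop where
  hd : dA = dB
  hbest : bestA = bestB
  hlink : ∀ k : Int, 1 ≤ k → fcA.getD k 0 = fr.getD k 0
  hnd : fcA.keys.Nodup
  hpos : ∀ p ∈ fcA.items, 1 ≤ p.1 ∧ 1 ≤ p.2
  hsum : Slist fcA.items = i
  hub : ∀ p ∈ fcA.items, p.1 ≤ maxF
  hat : fcA.contains maxF = true ∨ (fcA.items = [] ∧ maxF = 0)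
  hdnd : dA.keys.Nodup
  hdpos : ∀ p ∈ dA.items, 1 ≤ p.2
  hcc : ∀ k : Int, 1 ≤ k → fcA.getD k 0 = cntv dA.items k

def StInv (i : Int) (sA : PySem.Dict Int Int × PySem.Dict Int Int × Int)
    (sB : PySem.Dict Int Int × PySem.Dict Int Int × Int × Int) : Prop :=
  EqInv i sA.1 sA.2.1 sA.2.2 sB.1 sB.2.1 sB.2.2.1 sB.2.2.2

theorem step_inv (i x : Int) (sA : PySem.Dict Int Int × PySem.Dict Int Int × Int)
    (sB : PySem.Dict Int Int × PySem.Dict Int Int × Int × Int)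
    (h : StInv i sA sB) :
    StInv (i + 1) (maxEqualFreqStepA sA (i, x)) (maxEqualFreqStepB sB (i, x)) := by
  obtain ⟨dA, fcA, bestA⟩ := sA
  obtain ⟨dB, fr, maxF, bestB⟩ := sB
  obtain ⟨hd, hbest, hlink, hnd, hpos, hsum, hub, hat, hdnd, hdpos, hcc⟩ := h
  dsimp only at hd hbest hlink hnd hpos hsum hub hat hdnd hdpos hcc
  subst hd
  simp only [maxEqualFreqStepA, maxEqualFreqStepB, StInv]
  set prev := dA.getD x 0 with hprevdef
  have hsub : prev + 1 - 1 = prev := by omega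
  rw [hsub]
  have hprev0 : 0 ≤ prev := getD_nonneg dA x hdpos
  have hvpos : ∀ p ∈ fcA.items, 1 ≤ p.2 := fun p hp => (hpos p hp).2
  have hw1 : 0 < prev → 1 ≤ fcA.getD prev 0 := by
    intro hp
    have hcont : dA.contains x = true := contains_of_getD_pos dA x (by omega)
    have hxm : (x, prev) ∈ dA.items := getD_mem_items dA x hcont
    rw [hcc _ (by omega)]
    exact cntv_pos_of_mem dA.items x prev hxm
  set fc1 := (if 0 < prev then
      (if (fcA.insert prev (fcA.getD prev 0 - 1)).getD prev 0 = 0 then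
        (fcA.insert prev (fcA.getD prev 0 - 1)).erase prev
      else fcA.insert prev (fcA.getD prev 0 - 1))
    else fcA) with hfc1def
  obtain ⟨G1, N1, M1, S1, C1⟩ :
      (∀ k : Int, fc1.getD k 0 =
        if k = prev ∧ 0 < prev then fcA.getD prev 0 - 1 else fcA.getD k 0) ∧
      fc1.keys.Nodup ∧
      (∀ p ∈ fc1.items,
        (p = (prev, fcA.getD prev 0 - 1) ∧ 0 < prev ∧ fcA.getD prev 0 - 1 ≠ 0) ∨
          p ∈ fcA.items) ∧
      Slist fc1.items = Slist fcA.items - (if 0 < prev then prev else 0) ∧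
      (∀ k : Int, k ≠ prev → fc1.contains k = fcA.contains k) := by
    by_cases hp : 0 < prev
    · have hself : (fcA.insert prev (fcA.getD prev 0 - 1)).getD prev 0 = fcA.getD prev 0 - 1 := by
        rw [PySem.Dict.getD_insert]; simp
      by_cases hz : fcA.getD prev 0 - 1 = 0
      · rw [hfc1def, if_pos hp, if_pos (by rw [hself]; exact hz)]
        refine ⟨?_, ?_, ?_, ?_, ?_⟩
        · intro k
          rw [getD_erase, PySem.Dict.getD_insert]
          by_cases hk : k = prev <;> simp [hk, hp, hz]
        · exact nodup_keys_erase _ _ (PySem.Dict.nodup_keys_insert _ _ _ hnd)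
        · intro p hp'
          rw [mem_items_erase] at hp'
          rcases (PySem.Dict.mem_items_insert _ _ _ _).1 hp'.1 with h1 | h1
          · exact absurd (by rw [h1]) hp'.2
          · exact Or.inr h1.1
        · rw [Slist_erase _ _ (PySem.Dict.nodup_keys_insert _ _ _ hnd), hself, hz,
            Slist_insert _ _ _ hnd]
          rw [if_pos hp]
          have h1 : fcA.getD prev 0 = 1 := by omega
          rw [h1]; ring
        · intro k hk
          rw [contains_erase, if_neg hk, PySem.Dict.contains_insert]
          simp [hk]
      · rw [hfc1def, if_pos hp, if_neg (by rw [hself]; exact hz)]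
        refine ⟨?_, ?_, ?_, ?_, ?_⟩
        · intro k
          rw [PySem.Dict.getD_insert]
          by_cases hk : k = prev <;> simp [hk, hp]
        · exact PySem.Dict.nodup_keys_insert _ _ _ hnd
        · intro p hp'
          rcases (PySem.Dict.mem_items_insert _ _ _ _).1 hp' with h1 | h1
          · exact Or.inl ⟨h1, hp, hz⟩
          · exact Or.inr h1.1
        · rw [Slist_insert _ _ _ hnd]
          rw [if_pos hp]
          ring
        · intro k hk
          rw [PySem.Dict.contains_insert]
          simp [hk]
    · rw [hfc1def, if_neg hp]
      refine ⟨?_, hnd, fun p hp' => Or.inr hp', by simp [hp], fun _ _ => rfl⟩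
      intro k
      by_cases hk : k = prev <;> simp [hk, hp]
  clear hfc1def
  have hc1c : fc1.getD (prev + 1) 0 = fcA.getD (prev + 1) 0 := by
    rw [G1, if_neg (by omega)]
  set fc2 := fc1.insert (prev + 1) (fc1.getD (prev + 1) 0 + 1) with hfc2def
  have G2 : ∀ k : Int, fc2.getD k 0 =
      if k = prev + 1 then fcA.getD (prev + 1) 0 + 1
      else if k = prev ∧ 0 < prev then fcA.getD prev 0 - 1 else fcA.getD k 0 := by
    intro k
    rw [hfc2def, PySem.Dict.getD_insert]
    by_cases hk : k = prev + 1
    · simp [hk, hc1c]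
    · simp [hk, G1]
  have N2 : fc2.keys.Nodup := PySem.Dict.nodup_keys_insert _ _ _ N1
  have M2 : ∀ p ∈ fc2.items,
      p = (prev + 1, fc1.getD (prev + 1) 0 + 1) ∨
        (p = (prev, fcA.getD prev 0 - 1) ∧ 0 < prev ∧ fcA.getD prev 0 - 1 ≠ 0) ∨
          p ∈ fcA.items := by
    intro p hp'
    rcases (PySem.Dict.mem_items_insert _ _ _ _).1 hp' with h1 | h1
    · exact Or.inl h1
    · exact Or.inr (M1 p h1.1)
  have S2 : Slist fc2.items = i + 1 := by
    rw [hfc2def, Slist_insert _ _ _ N1]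
    have hprod : (prev + 1) * (fc1.getD (prev + 1) 0 + 1) -
        (prev + 1) * fc1.getD (prev + 1) 0 = prev + 1 := by ring
    by_cases hp : 0 < prev
    · rw [if_pos hp] at S1; omega
    · rw [if_neg hp] at S1; omega
  have C2self : fc2.contains (prev + 1) = true := PySem.Dict.contains_insert_self _ _ _
  have C2 : ∀ k : Int, k ≠ prev + 1 → fc2.contains k = fc1.contains k := by
    intro k hk
    rw [hfc2def, PySem.Dict.contains_insert]
    simp [hk]
  set fr2 := (fr.insert prev (fr.getD prev 0 - 1)).insert (prev + 1)
      ((fr.insert prev (fr.getD prev 0 - 1)).getD (prev + 1) 0 + 1) with hfr2def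
  have GB : ∀ k : Int, fr2.getD k 0 =
      if k = prev + 1 then fr.getD (prev + 1) 0 + 1
      else if k = prev then fr.getD prev 0 - 1 else fr.getD k 0 := by
    intro k
    have hne2 : ¬ (prev + 1 = prev) := by omega
    rw [hfr2def]
    by_cases hk : k = prev + 1
    · simp [PySem.Dict.getD_insert, hk, hne2]
    · by_cases hk2 : k = prev
      · simp [PySem.Dict.getD_insert, hk2, hne2]
      · simp [PySem.Dict.getD_insert, hk, hk2]
  set mF := (if maxF < prev + 1 then prev + 1 else maxF) with hmFdef
  have hlink2 : ∀ k : Int, 1 ≤ k → fc2.getD k 0 = fr2.getD k 0 := by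
    intro k hk
    rw [G2 k, GB k]
    by_cases hk1 : k = prev + 1
    · simp [hk1, hlink (prev + 1) (by omega)]
    · by_cases hk2 : k = prev
      · have hp : 0 < prev := by omega
        simp [hk2, hp, hlink prev (by omega)]
      · simp [hk1, hk2, hlink k hk]
  have hpos2 : ∀ p ∈ fc2.items, 1 ≤ p.1 ∧ 1 ≤ p.2 := by
    intro p hp'
    rcases M2 p hp' with h1 | ⟨h1, h2, h3⟩ | h1
    · rw [h1]
      have := getD_nonneg fcA (prev + 1) hvpos
      constructor
      · simp; omega
      · simp [hc1c]; omega
    · rw [h1]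
      have := hw1 h2
      constructor
      · simp; omega
      · simp; omega
    · exact hpos p h1
  have hub2 : ∀ p ∈ fc2.items, p.1 ≤ mF := by
    intro p hp'
    have hmF1 : prev + 1 ≤ mF := by rw [hmFdef]; split <;> omega
    rcases M2 p hp' with h1 | ⟨h1, h2, h3⟩ | h1
    · rw [h1]; simpa using hmF1
    · rw [h1]; simp; omega
    · have := hub p h1
      have hmF2 : maxF ≤ mF := by rw [hmFdef]; split <;> omega
      omega
  have hat2 : fc2.contains mF = true := by
    by_cases hmc : maxF < prev + 1
    · rw [hmFdef, if_pos hmc]; exact C2self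
    · rw [hmFdef, if_neg hmc]
      rcases hat with hcont | ⟨_, hm0⟩
      · by_cases hme : maxF = prev + 1
        · rw [hme]; exact C2self
        · rw [C2 maxF hme, C1 maxF (by omega), hcont]
      · omega
  have hcc2 : ∀ k : Int, 1 ≤ k → fc2.getD k 0 = cntv (dA.insert x (prev + 1)).items k := by
    intro k hk
    rw [G2 k, cntv_insert dA x (prev + 1) k hdnd (by omega), ← hprevdef, ← hcc _ hk]
    by_cases hk1 : k = prev + 1
    · rw [if_pos hk1, if_pos hk1.symm, if_neg (show ¬ prev = k by omega), hk1]
      omega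
    · by_cases hk2 : k = prev ∧ 0 < prev
      · rw [if_neg hk1, if_pos hk2, if_neg (show ¬ prev + 1 = k by omega),
          if_pos hk2.1.symm, hk2.1]
        omega
      · have hkp : ¬ prev = k := by intro hpe; exact hk2 ⟨hpe.symm, by omega⟩
        rw [if_neg hk1, if_neg hk2, if_neg (show ¬ prev + 1 = k by omega), if_neg hkp]
        omega
  refine ⟨rfl, ?_, hlink2, N2, hpos2, S2, hub2, Or.inl hat2,
    PySem.Dict.nodup_keys_insert _ _ _ hdnd, ?_, hcc2⟩
  · rw [valid_eq fc2 fr2 mF (i + 1) N2 hpos2 S2 hub2 hat2 hlink2, hbest]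
  · intro p hp'
    rcases (PySem.Dict.mem_items_insert _ _ _ _).1 hp' with h1 | h1
    · rw [h1]; simp; omega
    · exact hdpos p h1.1

theorem fold_inv (l : List Int) : ∀ (i : Int) sA sB, StInv i sA sB →
    ∃ j, StInv j ((PySem.List.enumerate l i).foldl maxEqualFreqStepA sA)
      ((PySem.List.enumerate l i).foldl maxEqualFreqStepB sB) := by
  induction l with
  | nil =>
    intro i sA sB h
    exact ⟨i, by simpa [PySem.List.enumerate_nil] using h⟩
  | cons y t ih =>
    intro i sA sB h
    rw [PySem.List.enumerate_cons, List.foldl_cons, List.foldl_cons]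
    exact ih (i + 1) _ _ (step_inv i y sA sB h)

theorem init_inv : StInv 0 (PySem.Dict.empty, PySem.Dict.empty, 0)
    (PySem.Dict.empty, PySem.Dict.empty, 0, 0) := by
  refine ⟨rfl, rfl, ?_, ?_, ?_, ?_, ?_, ?_, ?_, ?_, ?_⟩ <;>
    simp [PySem.Dict.empty, PySem.Dict.getD, PySem.Dict.get?, PySem.Dict.keys,
      PySem.Dict.contains, Slist, cntv]

-- ===== VERDICT (by name: the statement is the Claim_ definition above) =====
theorem maxEqualFreq_spec : Claim_equal_maxEqualFreq := by
  intro nums _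
  unfold Spec_maxEqualFreq maxEqualFreq maxEqualFreq_alt
  obtain ⟨j, hj⟩ := fold_inv nums 0 _ _ init_inv
  exact hj.hbest
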